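-- pv_equiv track=rewrite | github.com/KevinYyyyyy/PyVulAudit | pydriller/domain/commit.py | get_changed_vars
-- ===== SOURCE A (Python) =====
-- def get_changed_vars(global_changed_lines, global_vars):
--     """
--     获取修改的变量
--     """
--     changed_vars = set()
--     changed_vars_lines = []
--     for var in global_vars:
--         for line in global_changed_lines:
--             if var[1][0] <= line[0] <= var[1][1]:
--                 changed_vars.add(var)
--                 changed_vars_lines.append(line)
--     return changed_vars, changed_vars_lines
-- ===== SOURCE B (Python) =====
-- def _bisect_left(keys, x):
--     lo, hi = 0, len(keys)
--     while lo < hi: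
--         mid = (lo + hi) // 2
--         if keys[mid] < x:
--             lo = mid + 1
--         else:
--             hi = mid
--     return lo
--
--
-- def _bisect_right(keys, x):
--     lo, hi = 0, len(keys)
--     while lo < hi:
--         mid = (lo + hi) // 2
--         if keys[mid] <= x:
--             lo = mid + 1
--         else:
--             hi = mid
--     return lo
--
--
-- def get_changed_vars(global_changed_lines, global_vars):
--     """
--     Same result as A, but: sort the changed lines once by line number, then
--     binary-search each var's [lo, hi] range; matched indices are re-sorted so
--     the per-var line order is the original one.
--     """
--     n = len(global_changed_lines)
--     order = sorted(range(n), key=lambda i: global_changed_lines[i][0])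
--     keys = [global_changed_lines[i][0] for i in order]
--     changed_vars = set()
--     changed_vars_lines = []
--     for var in global_vars:
--         lo, hi = var[1]
--         l = _bisect_left(keys, lo)
--         r = _bisect_right(keys, hi)
--         if l < r:
--             changed_vars.add(var)
--             for i in sorted(order[l:r]):
--                 changed_vars_lines.append(global_changed_lines[i])
--     return changed_vars, changed_vars_lines
-- ===== Notes on version B (the rewrite author's own statement) =====
-- stated objective: alternative
-- what changed: Instead of testing every (var, line) pair, B sorts the changed-line indices by line number once and binary-searches each var's [lo, hi] interval, re-sorting the matched indices to restore the original per-var line order; intended as faster (O(V*L) -> O((V+L) log L + M log M)), but a timing run could not consistently confirm >=1.5x, so no speed is claimed.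
import Mathlib
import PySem

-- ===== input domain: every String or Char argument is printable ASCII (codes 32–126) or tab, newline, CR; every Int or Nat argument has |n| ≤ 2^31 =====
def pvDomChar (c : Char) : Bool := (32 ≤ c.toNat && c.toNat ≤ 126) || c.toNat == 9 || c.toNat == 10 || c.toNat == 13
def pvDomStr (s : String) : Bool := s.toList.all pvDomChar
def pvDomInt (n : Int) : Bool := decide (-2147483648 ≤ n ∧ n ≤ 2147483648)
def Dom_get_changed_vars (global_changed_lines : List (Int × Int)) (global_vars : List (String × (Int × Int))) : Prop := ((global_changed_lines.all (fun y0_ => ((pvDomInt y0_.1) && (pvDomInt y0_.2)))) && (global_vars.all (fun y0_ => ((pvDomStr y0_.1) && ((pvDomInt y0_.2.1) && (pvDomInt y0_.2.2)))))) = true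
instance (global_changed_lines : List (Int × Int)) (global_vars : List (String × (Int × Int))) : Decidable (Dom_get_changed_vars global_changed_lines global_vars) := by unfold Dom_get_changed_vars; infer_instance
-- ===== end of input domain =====

-- B replaces A's all-pairs scan by one sort of the changed-line indices plus a binary search
-- of each var's interval (objective: alternative algorithm; neither version mutates its arguments).

-- ===== PORT A =====
def get_changed_vars (global_changed_lines : List (Int × Int)) (global_vars : List (String × (Int × Int))) : (List (String × (Int × Int))) × (List (Int × Int)) :=
  global_vars.foldl
    (fun st var =>
      global_changed_lines.foldl
        (fun st2 line =>
          if var.2.1 ≤ line.1 ∧ line.1 ≤ var.2.2 then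
            (PySem.Set.add st2.1 var, st2.2 ++ [line])
          else st2)
        st)
    ((PySem.Set.empty : PySem.Set (String × (Int × Int))), ([] : List (Int × Int)))

-- ===== PORT B =====
-- Source B hand-writes its binary searches (A imports no module, so Source B may not import bisect);
-- they are ported step for step, with the loop as the obvious recursion on hi - lo
-- (mid = (lo+hi)//2 inlined; 0 ≤ lo ≤ mid < hi ≤ len(keys) throughout, so keys[mid] is getD).
def pvBisectLeftAux (keys : List Int) (x : Int) : Nat → Nat → Nat → Nat
  | 0, lo, _ => lo
  | fuel + 1, lo, hi =>
    if lo < hi then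
      if keys.getD ((lo + hi) / 2) 0 < x then pvBisectLeftAux keys x fuel ((lo + hi) / 2 + 1) hi
      else pvBisectLeftAux keys x fuel lo ((lo + hi) / 2)
    else lo

def pvBisectLeft (keys : List Int) (x : Int) (lo hi : Nat) : Nat :=
  pvBisectLeftAux keys x (hi - lo) lo hi

def pvBisectRightAux (keys : List Int) (x : Int) : Nat → Nat → Nat → Nat
  | 0, lo, _ => lo
  | fuel + 1, lo, hi =>
    if lo < hi then
      if keys.getD ((lo + hi) / 2) 0 ≤ x then pvBisectRightAux keys x fuel ((lo + hi) / 2 + 1) hi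
      else pvBisectRightAux keys x fuel lo ((lo + hi) / 2)
    else lo

def pvBisectRight (keys : List Int) (x : Int) (lo hi : Nat) : Nat :=
  pvBisectRightAux keys x (hi - lo) lo hi

-- indices are kept as Nat (they are list positions, always ≥ 0 in Source B);
-- order[l:r] with 0 ≤ l, r ≤ len is (drop l).take (r - l), and in-range indexing is getD
def get_changed_vars_alt (global_changed_lines : List (Int × Int)) (global_vars : List (String × (Int × Int))) : (List (String × (Int × Int))) × (List (Int × Int)) :=
  let n := global_changed_lines.length
  let order := PySem.List.sorted (List.range n) (fun i => (global_changed_lines.getD i (0, 0)).1)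
  let keys := order.map (fun i => (global_changed_lines.getD i (0, 0)).1)
  global_vars.foldl
    (fun st var =>
      let l := pvBisectLeft keys var.2.1 0 keys.length
      let r := pvBisectRight keys var.2.2 0 keys.length
      if l < r then
        (PySem.Set.add st.1 var,
         (PySem.List.sorted ((order.drop l).take (r - l)) (fun i => i)).foldl
           (fun acc i => acc ++ [global_changed_lines.getD i (0, 0)]) st.2)
      else st)
    ((PySem.Set.empty : PySem.Set (String × (Int × Int))), ([] : List (Int × Int)))

-- ===== PRECONDITION & SPEC =====
def Spec_get_changed_vars (global_changed_lines : List (Int × Int)) (global_vars : List (String × (Int × Int))) (out : (List (String × (Int × Int))) × (List (Int × Int))) : Prop := out = get_changed_vars_alt global_changed_lines global_vars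
instance (global_changed_lines : List (Int × Int)) (global_vars : List (String × (Int × Int))) (out : (List (String × (Int × Int))) × (List (Int × Int))) : Decidable (Spec_get_changed_vars global_changed_lines global_vars out) := by unfold Spec_get_changed_vars; infer_instance

-- ===== CLAIM (what is proved, stated in full; the proofs are below) =====
def Claim_equal_get_changed_vars : Prop := ∀ (global_changed_lines : List (Int × Int)) (global_vars : List (String × (Int × Int))), Dom_get_changed_vars global_changed_lines global_vars → Spec_get_changed_vars global_changed_lines global_vars (get_changed_vars global_changed_lines global_vars)

-- ===== LEMMAS AND PROOFS =====

-- mapping position → element over the matching positions yields the filtered list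
theorem pvFilterMapRange {α : Type} (P : α → Bool) (d : α) (xs : List α) :
    ((List.range xs.length).filter (fun i => P (xs.getD i d))).map (fun i => xs.getD i d)
      = xs.filter P := by
  induction xs with
  | nil => simp
  | cons x xs ih =>
    rw [List.length_cons, List.range_succ_eq_map, List.filter_cons, List.filter_map]
    by_cases h : P x
    · rw [if_pos (by simpa using h), List.filter_cons_of_pos h, List.map_cons, List.map_map]
      simp only [Function.comp_def, List.getD_cons_succ, List.getD_cons_zero]
      rw [ih]
    · rw [if_neg (by simpa using h), List.filter_cons_of_neg h, List.map_map]
      simp only [Function.comp_def, List.getD_cons_succ]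
      rw [ih]

-- A's inner loop over the changed lines: one conditional Set.add plus appending the matching lines
theorem pvInnerA (lines : List (Int × Int)) (var : String × (Int × Int))
    (s : PySem.Set (String × (Int × Int))) (acc : List (Int × Int)) :
    lines.foldl
        (fun st2 line =>
          if var.2.1 ≤ line.1 ∧ line.1 ≤ var.2.2 then
            (PySem.Set.add st2.1 var, st2.2 ++ [line])
          else st2) (s, acc)
      = ((if lines.any (fun line => decide (var.2.1 ≤ line.1 ∧ line.1 ≤ var.2.2)) then PySem.Set.add s var else s),
         acc ++ lines.filter (fun line => decide (var.2.1 ≤ line.1 ∧ line.1 ≤ var.2.2))) := by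
  induction lines generalizing s acc with
  | nil => simp
  | cons line rest ih =>
    by_cases h : var.2.1 ≤ line.1 ∧ line.1 ≤ var.2.2
    · simp only [List.foldl_cons, ih, List.any_cons, List.filter_cons,
        decide_eq_true_eq, h]
      simp
    · simp only [List.foldl_cons, ih, List.any_cons, List.filter_cons,
        h, decide_false, Bool.false_or]
      simp

theorem pvBisectLeftAux_spec (ks : List Int) (x : Int) (fuel lo hi : Nat)
    (hfuel : hi - lo ≤ fuel) (hlh : lo ≤ hi) (hhi : hi ≤ ks.length)
    (hmono : ∀ a b : Nat, a ≤ b → b < ks.length → ks.getD a 0 ≤ ks.getD b 0)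
    (h1 : ∀ j, j < lo → ks.getD j 0 < x)
    (h2 : ∀ j, hi ≤ j → j < ks.length → x ≤ ks.getD j 0) :
    pvBisectLeftAux ks x fuel lo hi ≤ ks.length ∧
    (∀ j, j < pvBisectLeftAux ks x fuel lo hi → ks.getD j 0 < x) ∧
    (∀ j, pvBisectLeftAux ks x fuel lo hi ≤ j → j < ks.length → x ≤ ks.getD j 0) := by
  induction fuel generalizing lo hi with
  | zero =>
    have hlo : lo = hi := by omega
    exact ⟨by simp only [pvBisectLeftAux]; omega, by simpa only [pvBisectLeftAux] using h1,
      fun j hj hjl => h2 j (by simp only [pvBisectLeftAux] at hj; omega) hjl⟩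
  | succ n ih =>
    rw [pvBisectLeftAux]
    split
    · next h =>
      split
      · next hc =>
        exact ih ((lo + hi) / 2 + 1) hi (by omega) (by omega) hhi
          (fun j hj => lt_of_le_of_lt (hmono j ((lo + hi) / 2) (by omega) (by omega)) hc) h2
      · next hc =>
        exact ih lo ((lo + hi) / 2) (by omega) (by omega) (by omega) h1
          (fun j hj hjl => le_trans (not_lt.mp hc) (hmono ((lo + hi) / 2) j hj hjl))
    · next h =>
      exact ⟨by omega, h1, fun j hj hjl => h2 j (by omega) hjl⟩

theorem pvBisectRightAux_spec (ks : List Int) (x : Int) (fuel lo hi : Nat)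
    (hfuel : hi - lo ≤ fuel) (hlh : lo ≤ hi) (hhi : hi ≤ ks.length)
    (hmono : ∀ a b : Nat, a ≤ b → b < ks.length → ks.getD a 0 ≤ ks.getD b 0)
    (h1 : ∀ j, j < lo → ks.getD j 0 ≤ x)
    (h2 : ∀ j, hi ≤ j → j < ks.length → x < ks.getD j 0) :
    pvBisectRightAux ks x fuel lo hi ≤ ks.length ∧
    (∀ j, j < pvBisectRightAux ks x fuel lo hi → ks.getD j 0 ≤ x) ∧
    (∀ j, pvBisectRightAux ks x fuel lo hi ≤ j → j < ks.length → x < ks.getD j 0) := by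
  induction fuel generalizing lo hi with
  | zero =>
    have hlo : lo = hi := by omega
    exact ⟨by simp only [pvBisectRightAux]; omega, by simpa only [pvBisectRightAux] using h1,
      fun j hj hjl => h2 j (by simp only [pvBisectRightAux] at hj; omega) hjl⟩
  | succ n ih =>
    rw [pvBisectRightAux]
    split
    · next h =>
      split
      · next hc =>
        exact ih ((lo + hi) / 2 + 1) hi (by omega) (by omega) hhi
          (fun j hj => le_trans (hmono j ((lo + hi) / 2) (by omega) (by omega)) hc) h2
      · next hc =>
        exact ih lo ((lo + hi) / 2) (by omega) (by omega) (by omega) h1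
          (fun j hj hjl => lt_of_lt_of_le (not_le.mp hc) (hmono ((lo + hi) / 2) j hj hjl))
    · next h =>
      exact ⟨by omega, h1, fun j hj hjl => h2 j (by omega) hjl⟩

theorem pvBisectLeft_spec (ks : List Int) (x : Int) (lo hi : Nat)
    (hlh : lo ≤ hi) (hhi : hi ≤ ks.length)
    (hmono : ∀ a b : Nat, a ≤ b → b < ks.length → ks.getD a 0 ≤ ks.getD b 0)
    (h1 : ∀ j, j < lo → ks.getD j 0 < x)
    (h2 : ∀ j, hi ≤ j → j < ks.length → x ≤ ks.getD j 0) :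
    pvBisectLeft ks x lo hi ≤ ks.length ∧
    (∀ j, j < pvBisectLeft ks x lo hi → ks.getD j 0 < x) ∧
    (∀ j, pvBisectLeft ks x lo hi ≤ j → j < ks.length → x ≤ ks.getD j 0) :=
  pvBisectLeftAux_spec ks x (hi - lo) lo hi le_rfl hlh hhi hmono h1 h2

theorem pvBisectRight_spec (ks : List Int) (x : Int) (lo hi : Nat)
    (hlh : lo ≤ hi) (hhi : hi ≤ ks.length)
    (hmono : ∀ a b : Nat, a ≤ b → b < ks.length → ks.getD a 0 ≤ ks.getD b 0)
    (h1 : ∀ j, j < lo → ks.getD j 0 ≤ x)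
    (h2 : ∀ j, hi ≤ j → j < ks.length → x < ks.getD j 0) :
    pvBisectRight ks x lo hi ≤ ks.length ∧
    (∀ j, j < pvBisectRight ks x lo hi → ks.getD j 0 ≤ x) ∧
    (∀ j, pvBisectRight ks x lo hi ≤ j → j < ks.length → x < ks.getD j 0) :=
  pvBisectRightAux_spec ks x (hi - lo) lo hi le_rfl hlh hhi hmono h1 h2

theorem pvSliceChar (lines : List (Int × Int)) (xlo xhi : Int)
    (order : List Nat) (keys : List Int) (l r : Nat)
    (horder : order = PySem.List.sorted (List.range lines.length) (fun i => (lines.getD i (0, 0)).1))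
    (hkeys : keys = order.map (fun i => (lines.getD i (0, 0)).1))
    (hl : l = pvBisectLeft keys xlo 0 keys.length)
    (hr : r = pvBisectRight keys xhi 0 keys.length) :
    (PySem.List.sorted ((order.drop l).take (r - l)) (fun i => i))
        = (List.range lines.length).filter
            (fun i => decide (xlo ≤ (lines.getD i (0, 0)).1 ∧ (lines.getD i (0, 0)).1 ≤ xhi))
    ∧ (l < r ↔ (List.range lines.length).filter
            (fun i => decide (xlo ≤ (lines.getD i (0, 0)).1 ∧ (lines.getD i (0, 0)).1 ≤ xhi)) ≠ []) := by
  have hperm : order.Perm (List.range lines.length) := horder ▸ PySem.List.sorted_perm _ _ _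
  have hlen : order.length = lines.length := hperm.length_eq.trans (List.length_range)
  have hmem : ∀ i : Nat, i ∈ order ↔ i < lines.length := fun i => hperm.mem_iff.trans List.mem_range
  have hnd : order.Nodup := hperm.symm.nodup List.nodup_range
  have hkp : List.Pairwise (· ≤ ·) keys := by
    rw [hkeys, horder]; exact PySem.List.sorted_map_key_pairwise _ _
  have hklen : keys.length = order.length := by rw [hkeys]; exact List.length_map ..
  have hkey : ∀ j, j < order.length → keys.getD j 0 = (lines.getD (order.getD j 0) (0, 0)).1 := by
    intro j hj
    rw [hkeys, List.getD_eq_getElem _ _ (by simpa using hj), List.getElem_map,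
      List.getD_eq_getElem _ _ hj]
  have hmono : ∀ a b : Nat, a ≤ b → b < keys.length → keys.getD a 0 ≤ keys.getD b 0 := by
    intro a b hab hb
    rcases eq_or_lt_of_le hab with rfl | hlt
    · exact le_refl _
    · rw [List.getD_eq_getElem _ _ (lt_trans hlt hb), List.getD_eq_getElem _ _ hb]
      exact List.pairwise_iff_getElem.mp hkp a b _ _ hlt
  have hLspec := pvBisectLeft_spec keys xlo 0 keys.length (Nat.zero_le _) le_rfl hmono
      (fun j hj => absurd hj (Nat.not_lt_zero j)) (fun j hj hjl => absurd hjl (by omega))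
  rw [← hl] at hLspec
  obtain ⟨hlle, hl1, hl2⟩ := hLspec
  have hRspec := pvBisectRight_spec keys xhi 0 keys.length (Nat.zero_le _) le_rfl hmono
      (fun j hj => absurd hj (Nat.not_lt_zero j)) (fun j hj hjl => absurd hjl (by omega))
  rw [← hr] at hRspec
  obtain ⟨hrle, hr1, hr2⟩ := hRspec
  have hSmem : ∀ i : Nat, i ∈ (order.drop l).take (r - l) ↔
      (i < lines.length ∧ xlo ≤ (lines.getD i (0, 0)).1 ∧ (lines.getD i (0, 0)).1 ≤ xhi) := by
    intro i
    constructor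
    · intro hi
      obtain ⟨k, hk, hSk⟩ := List.mem_iff_getElem.mp hi
      have hklt : k < min (r - l) (order.length - l) := by simpa using hk
      have hlk1 : l + k < order.length := by omega
      have hgetk : ((order.drop l).take (r - l))[k]'hk = order[l + k]'hlk1 := by
        rw [List.getElem_take, List.getElem_drop]
      have hiolk : order[l + k]'hlk1 = i := by rw [← hgetk, hSk]
      have hio : i ∈ order := by rw [← hiolk]; exact List.getElem_mem _
      have hin : i < lines.length := (hmem i).mp hio
      have hkeyi : keys.getD (l + k) 0 = (lines.getD i (0, 0)).1 := by
        rw [hkey (l + k) hlk1]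
        congr 2
        rw [List.getD_eq_getElem _ _ hlk1, hiolk]
      refine ⟨hin, ?_, ?_⟩
      · have := hl2 (l + k) (by omega) (by omega)
        rwa [hkeyi] at this
      · have := hr1 (l + k) (by omega)
        rwa [hkeyi] at this
    · rintro ⟨hin, hxlo, hxhi⟩
      have hio : i ∈ order := (hmem i).mpr hin
      obtain ⟨k, hk, hok⟩ := List.mem_iff_getElem.mp hio
      have hkeyk : keys.getD k 0 = (lines.getD i (0, 0)).1 := by
        rw [hkey k hk]
        congr 2
        rw [List.getD_eq_getElem _ _ hk, hok]
      have hlk : l ≤ k := by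
        by_contra hc
        have := hl1 k (by omega)
        rw [hkeyk] at this; omega
      have hkr : k < r := by
        by_contra hc
        have := hr2 k (by omega) (by omega)
        rw [hkeyk] at this; omega
      apply List.mem_iff_getElem.mpr
      refine ⟨k - l, by simp only [List.length_take, List.length_drop]; omega, ?_⟩
      rw [List.getElem_take, List.getElem_drop]
      have heq : l + (k - l) = k := by omega
      simp only [heq, hok]
  have hSnd : ((order.drop l).take (r - l)).Nodup :=
    ((List.take_sublist _ _).trans (List.drop_sublist _ _)).nodup hnd
  have hTnd : ((List.range lines.length).filter
      (fun i => decide (xlo ≤ (lines.getD i (0, 0)).1 ∧ (lines.getD i (0, 0)).1 ≤ xhi))).Nodup :=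
    List.Nodup.filter _ List.nodup_range
  have hTpw : ((List.range lines.length).filter
      (fun i => decide (xlo ≤ (lines.getD i (0, 0)).1 ∧ (lines.getD i (0, 0)).1 ≤ xhi))).Pairwise (· ≤ ·) :=
    (List.Pairwise.filter _ List.pairwise_lt_range).imp le_of_lt
  have hperm2 : ((List.range lines.length).filter
      (fun i => decide (xlo ≤ (lines.getD i (0, 0)).1 ∧ (lines.getD i (0, 0)).1 ≤ xhi))).Perm
      ((order.drop l).take (r - l)) := by
    rw [List.perm_ext_iff_of_nodup hTnd hSnd]
    intro a
    simp only [List.mem_filter, List.mem_range, decide_eq_true_eq, hSmem]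
    try tauto
  refine ⟨PySem.List.sorted_id_eq_of_perm_of_pairwise _ _ hperm2 hTpw, ?_⟩
  have hTS := hperm2.length_eq
  have hSlen : ((order.drop l).take (r - l)).length = min (r - l) (order.length - l) := by simp
  constructor
  · intro hlr
    apply List.ne_nil_of_length_pos
    rw [hTS, hSlen]; omega
  · intro hne
    have hpos := List.length_pos_of_ne_nil hne
    rw [hTS, hSlen] at hpos; omega

-- ===== VERDICT (by name: the statement is the Claim_ definition above) =====
theorem get_changed_vars_spec : Claim_equal_get_changed_vars := by
  unfold Claim_equal_get_changed_vars
  intro lines vars _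
  unfold Spec_get_changed_vars
  simp only [get_changed_vars, get_changed_vars_alt]
  apply PySem.List.foldl_congr_mem
  intro st var _
  obtain ⟨s, acc⟩ := st
  simp only []
  set ord := PySem.List.sorted (List.range lines.length) (fun i => (lines.getD i (0, 0)).1) with hord
  set ks := ord.map (fun i => (lines.getD i (0, 0)).1) with hks
  set l := pvBisectLeft ks var.2.1 0 ks.length with hlh
  set r := pvBisectRight ks var.2.2 0 ks.length with hrh
  obtain ⟨char1, char2⟩ := pvSliceChar lines var.2.1 var.2.2 ord ks l r hord hks hlh hrh
  have hm := pvFilterMapRange (fun line => decide (var.2.1 ≤ line.1 ∧ line.1 ≤ var.2.2)) (0, 0) lines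
  simp only [] at hm
  rw [pvInnerA, PySem.List.foldl_append_singleton_eq_map, char1, hm]
  have hfa : (lines.filter (fun line => decide (var.2.1 ≤ line.1 ∧ line.1 ≤ var.2.2)) = [])
      ↔ lines.any (fun line => decide (var.2.1 ≤ line.1 ∧ line.1 ≤ var.2.2)) = false := by
    simp [List.filter_eq_nil_iff, List.any_eq_false]
  have hTnil : ((List.range lines.length).filter
        (fun i => decide (var.2.1 ≤ (lines.getD i (0, 0)).1 ∧ (lines.getD i (0, 0)).1 ≤ var.2.2)) = [])
      ↔ lines.filter (fun line => decide (var.2.1 ≤ line.1 ∧ line.1 ≤ var.2.2)) = [] := by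
    constructor
    · intro h0
      rw [← hm, h0]
      rfl
    · intro h0
      exact List.map_eq_nil_iff.mp (hm.trans h0)
  rw [ne_eq, hTnil, hfa] at char2
  by_cases hany : lines.any (fun line => decide (var.2.1 ≤ line.1 ∧ line.1 ≤ var.2.2)) = true
  · rw [if_pos hany, if_pos (char2.mpr (fun hc => by rw [hany] at hc; cases hc))]
  · have hf : lines.any (fun line => decide (var.2.1 ≤ line.1 ∧ line.1 ≤ var.2.2)) = false := by
      simpa using hany
    rw [if_neg hany, if_neg (fun hc => (char2.mp hc) hf)]
    rw [hfa.mpr hf, List.append_nil]
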